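-- pv_equiv track=rewrite | github.com/RMWinslow/RMWinslow.github.io | Script/CollapsibleAnimals/animallisttohtml.py | stripCategories
-- ===== SOURCE A (Python) =====
-- def getLineData(line):
--     depth = 0
--     while line[:4] == '    ':
--         depth += 1
--         line = line[4:]
--     return depth, line
--
-- def getTextData(textblock):
--     lines = textblock.split('\n')
--     depths = []
--     contents = []
--     for line in lines:
--         depths.append(getLineData(line)[0])
--         contents.append(getLineData(line)[1])
--     return depths, contents
--
-- def stripCategories(textblock):
--     """
--     Crawls through, checks to see if next entry has increased depth
--     If it does, then ignores the contents. Otherwise adds them to output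
--     """
--
--     #Get the depth and contenst of the line
--     depths, contents = getTextData(textblock)
--
--     newtext = ""
--
--     for i, line in enumerate(contents):
--         if i == len(contents)-1:
--             continue
--         else:
--             if depths[i] < depths[i+1]:
--                 "Start of new sublist"
--                 continue
--             else:
--                 "normal entry"
--                 newtext += line + '\n'
--
--     return newtext
-- ===== SOURCE B (Python) =====
-- def stripCategories(textblock):
--     """
--     Crawls through, checks to see if next entry has increased depth
--     If it does, then ignores the contents. Otherwise adds them to output
--     """
--     # Single reverse pass: walk the lines back-to-front, carrying the depth of
--     # the line that FOLLOWS the current one, and prepend each kept entry.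
--     # The last line is naturally dropped (no following line yet).
--     result = ""
--     next_depth = None
--     for line in reversed(textblock.split('\n')):
--         stripped = line.lstrip(' ')
--         depth = (len(line) - len(stripped)) // 4
--         if next_depth is not None and depth >= next_depth:
--             result = line[4 * depth:] + '\n' + result
--         next_depth = depth
--     return result
-- ===== Notes on version B (the rewrite author's own statement) =====
-- stated objective: alternative
-- what changed: B replaces A's staged passes (build parallel depths/contents arrays, then index loop with a last-index special case) by one reverse traversal that builds the output back-to-front, carrying only the following line's depth as state, so no arrays, indices or last-line special case remain.
import Mathlib
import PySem

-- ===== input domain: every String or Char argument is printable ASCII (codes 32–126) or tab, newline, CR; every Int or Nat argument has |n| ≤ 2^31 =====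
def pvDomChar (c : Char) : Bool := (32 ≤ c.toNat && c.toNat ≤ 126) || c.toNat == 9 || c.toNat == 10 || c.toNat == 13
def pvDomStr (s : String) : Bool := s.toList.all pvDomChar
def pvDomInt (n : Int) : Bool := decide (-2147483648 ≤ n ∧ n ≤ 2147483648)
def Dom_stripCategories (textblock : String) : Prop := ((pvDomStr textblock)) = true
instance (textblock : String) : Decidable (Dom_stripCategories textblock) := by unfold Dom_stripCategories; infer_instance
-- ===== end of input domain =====

-- B replaces A's staged passes (parallel depths/contents arrays + index loop with a
-- last-index special case) by one reverse traversal building the output back-to-front,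
-- carrying only the following line's depth as state (objective: alternative).

-- ===== PORT A =====
-- getLineData: while line[:4] == '    ': depth += 1; line = line[4:]
def pvGetLineData (line : List Char) : Nat × List Char :=
  if h : line.take 4 = [' ', ' ', ' ', ' '] then
    let r := pvGetLineData (line.drop 4)
    (r.1 + 1, r.2)
  else (0, line)
termination_by line.length
decreasing_by
  have : line.length ≥ 4 := by
    have := congrArg List.length h
    simp at this; omega
  simp; omega

def stripCategories (textblock : String) : String :=
  -- getTextData: split on '\n', build depths and contents lists
  let lines := PySem.Chars.splitOn textblock.toList ['\n']
  let depths := lines.map (fun l => (pvGetLineData l).1)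
  let contents := lines.map (fun l => (pvGetLineData l).2)
  -- for i, line in enumerate(contents): …   (depths[i], depths[i+1] are always in
  -- range where A reads them, so pyGetD with default 0 is exact here)
  let newtext := (PySem.List.enumerate contents 0).foldl (fun acc p =>
    if p.1 = (contents.length : Int) - 1 then acc
    else if PySem.List.pyGetD depths p.1 0 < PySem.List.pyGetD depths (p.1 + 1) 0 then acc
    else acc ++ p.2 ++ ['\n']) []
  String.ofList newtext

-- ===== PORT B =====
def stripCategories_alt (textblock : String) : String :=
  let lines := PySem.Chars.splitOn textblock.toList ['\n']
  -- for line in reversed(lines): …  with state (next_depth : Option, result)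
  let st := lines.reverse.foldl (fun (st : Option Nat × List Char) line =>
    -- lstrip(' ') is dropWhile (· == ' '), exact
    let stripped := line.dropWhile (· == ' ')
    let depth := (line.length - stripped.length) / 4
    let result := match st.1 with
      | some nd => if nd ≤ depth then line.drop (4 * depth) ++ '\n' :: st.2 else st.2
      | none => st.2
    (some depth, result)) (none, [])
  String.ofList st.2

-- ===== PRECONDITION & SPEC =====
def Spec_stripCategories (textblock : String) (out : String) : Prop := out = stripCategories_alt textblock
instance (textblock : String) (out : String) : Decidable (Spec_stripCategories textblock out) := by unfold Spec_stripCategories; infer_instance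

-- ===== CLAIM (what is proved, stated in full; the proofs are below) =====
def Claim_equal_stripCategories : Prop := ∀ (textblock : String), Dom_stripCategories textblock → Spec_stripCategories textblock (stripCategories textblock)

-- ===== LEMMAS AND PROOFS =====

-- mathematical depth and content of a line
def pvDepth (l : List Char) : Nat := (l.takeWhile (· == ' ')).length / 4
def pvContent (l : List Char) : List Char := l.drop (4 * pvDepth l)

-- the common recursive specification over the list of lines
def pvGo : List (List Char) → List Char
  | a :: b :: rest => (if pvDepth b ≤ pvDepth a then pvContent a ++ ['\n'] else []) ++ pvGo (b :: rest)
  | _ => []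

lemma pvTake4_iff (l : List Char) :
    l.take 4 = [' ', ' ', ' ', ' '] ↔ 4 ≤ (l.takeWhile (· == ' ')).length := by
  rcases l with _ | ⟨a, _ | ⟨b, _ | ⟨c, _ | ⟨d, rest⟩⟩⟩⟩
  · simp
  · constructor
    · intro h; exact absurd (congrArg List.length h) (by simp)
    · intro h
      have hle : (List.takeWhile (· == ' ') [a]).length ≤ ([a] : List Char).length :=
        (List.takeWhile_prefix _).length_le
      simp at hle; omega
  · constructor
    · intro h; exact absurd (congrArg List.length h) (by simp)
    · intro h
      have hle : (List.takeWhile (· == ' ') [a, b]).length ≤ ([a, b] : List Char).length :=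
        (List.takeWhile_prefix _).length_le
      simp at hle; omega
  · constructor
    · intro h; exact absurd (congrArg List.length h) (by simp)
    · intro h
      have hle : (List.takeWhile (· == ' ') [a, b, c]).length ≤ ([a, b, c] : List Char).length :=
        (List.takeWhile_prefix _).length_le
      simp at hle; omega
  · by_cases ha : a = ' ' <;> by_cases hb : b = ' ' <;> by_cases hc : c = ' ' <;> by_cases hd : d = ' ' <;>
      simp [List.takeWhile_cons, ha, hb, hc, hd]

lemma pvGLD_eq (l : List Char) : pvGetLineData l = (pvDepth l, pvContent l) := by
  induction l using pvGetLineData.induct with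
  | case1 l h ih =>
    rcases l with _ | ⟨a, _ | ⟨b, _ | ⟨c, _ | ⟨d, rest⟩⟩⟩⟩ <;> simp [List.take] at h
    obtain ⟨ha, hb, hc, hd⟩ := h
    subst ha; subst hb; subst hc; subst hd
    rw [pvGetLineData, dif_pos (by simp)]
    simp only [List.drop_succ_cons, List.drop_zero] at ih ⊢
    rw [ih]
    have htw : (List.takeWhile (· == ' ') (' ' :: ' ' :: ' ' :: ' ' :: rest)) =
        ' ' :: ' ' :: ' ' :: ' ' :: (List.takeWhile (· == ' ') rest) := by
      simp [List.takeWhile_cons]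
    have hdep : pvDepth (' ' :: ' ' :: ' ' :: ' ' :: rest) = pvDepth rest + 1 := by
      simp only [pvDepth, htw, List.length_cons]
      omega
    have hcon : pvContent (' ' :: ' ' :: ' ' :: ' ' :: rest) = pvContent rest := by
      simp only [pvContent, hdep]
      have h4 : 4 * (pvDepth rest + 1) = (4 * pvDepth rest) + 1 + 1 + 1 + 1 := by ring
      rw [h4]
      simp [List.drop_succ_cons]
    rw [hdep, hcon]
  | case2 l h =>
    rw [pvGetLineData, dif_neg h]
    have h4 : (l.takeWhile (· == ' ')).length < 4 := by
      by_contra hc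
      exact h ((pvTake4_iff l).mpr (by omega))
    have hdep : pvDepth l = 0 := Nat.div_eq_of_lt h4
    simp [pvContent, hdep]

lemma pvStrip_eq_takeWhile (l : List Char) :
    l.length - (l.dropWhile (· == ' ')).length = (l.takeWhile (· == ' ')).length := by
  have h : (l.takeWhile (· == ' ')).length + (l.dropWhile (· == ' ')).length = l.length := by
    rw [← List.length_append, List.takeWhile_append_dropWhile]
  omega

-- B side: the reverse fold computes (depth of the first line, pvGo L)
lemma pvB_side (L : List (List Char)) :
    L.foldr (fun line (st : Option Nat × List Char) =>
      let stripped := line.dropWhile (· == ' ')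
      let depth := (line.length - stripped.length) / 4
      let result := match st.1 with
        | some nd => if nd ≤ depth then line.drop (4 * depth) ++ '\n' :: st.2 else st.2
        | none => st.2
      (some depth, result)) (none, []) = (L.head?.map pvDepth, pvGo L) := by
  induction L with
  | nil => simp [pvGo]
  | cons a t ih =>
    rw [List.foldr_cons, ih]
    have hd : (a.length - (a.dropWhile (· == ' ')).length) / 4 = pvDepth a := by
      rw [pvStrip_eq_takeWhile]; rfl
    cases t with
    | nil => simp [pvGo, hd]
    | cons b r =>
      simp only [List.head?_cons, Option.map_some]
      by_cases h : pvDepth b ≤ pvDepth a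
      · simp [pvGo, hd, h, pvContent]
      · simp [pvGo, hd, h]

lemma pvA_side (L : List (List Char)) (s : Nat) (N : Nat) (D : List Nat)
    (hN : N = s + L.length)
    (hD : ∀ k, k < L.length → PySem.List.pyGetD D ((s : Int) + (k : Int)) 0 = pvDepth L[k]!) :
    ((PySem.List.enumerate (L.map pvContent) (s : Int)).flatMap (fun p =>
      if p.1 = (N : Int) - 1 then []
      else if PySem.List.pyGetD D p.1 0 < PySem.List.pyGetD D (p.1 + 1) 0 then []
      else p.2 ++ ['\n'])) = pvGo L := by
  induction L generalizing s with
  | nil => simp [pvGo]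
  | cons a t ih =>
    cases t with
    | nil =>
      have hN' : N = s + 1 := by simpa using hN
      rw [List.map_cons, List.map_nil, PySem.List.enumerate_cons, PySem.List.enumerate_nil,
        List.flatMap_cons, List.flatMap_nil, List.append_nil]
      rw [if_pos (by rw [hN']; push_cast; ring)]
      simp [pvGo]
    | cons b r =>
      have hd0 := hD 0 (by simp)
      have hd1 := hD 1 (by simp)
      simp only [Nat.cast_zero, add_zero, Nat.cast_one] at hd0 hd1
      simp only [List.getElem!_cons_zero, List.getElem!_cons_succ] at hd0 hd1
      have hlen : N = s + r.length + 2 := by simp at hN; omega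
      have hih : ((PySem.List.enumerate ((b :: r).map pvContent) (((s + 1 : Nat)) : Int)).flatMap (fun p =>
          if p.1 = (N : Int) - 1 then []
          else if PySem.List.pyGetD D p.1 0 < PySem.List.pyGetD D (p.1 + 1) 0 then []
          else p.2 ++ ['\n'])) = pvGo (b :: r) := by
        apply ih
        · simp; omega
        · intro k hk
          have hDk := hD (k + 1) (by simpa using Nat.succ_lt_succ hk)
          have hcast : ((s : Int) + ((k : Nat) + 1 : Nat)) = (((s + 1 : Nat) : Int) + (k : Int)) := by
            push_cast; ring
          rw [hcast] at hDk
          simpa using hDk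
      rw [List.map_cons, PySem.List.enumerate_cons, List.flatMap_cons]
      rw [if_neg (by push_cast; omega)]
      rw [hd0, hd1]
      have hcast : (s : Int) + 1 = (((s + 1 : Nat)) : Int) := by push_cast; ring
      rw [hcast, hih]
      by_cases h : pvDepth a < pvDepth b
      · rw [if_pos h]
        simp [pvGo, Nat.not_le.mpr h]
      · rw [if_neg h]
        simp [pvGo, Nat.le_of_not_lt h]

-- ===== VERDICT (by name: the statement is the Claim_ definition above) =====
theorem stripCategories_spec : Claim_equal_stripCategories := by
  intro textblock _
  unfold Spec_stripCategories
  simp only [stripCategories, stripCategories_alt]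
  generalize PySem.Chars.splitOn textblock.toList ['\n'] = lines
  -- A side: rewrite the two mapped helper projections, turn the fold into a flatMap
  have hmapc : lines.map (fun l => (pvGetLineData l).2) = lines.map pvContent := by
    apply List.map_congr_left; intro l _; rw [pvGLD_eq]
  have hmapd : lines.map (fun l => (pvGetLineData l).1) = lines.map pvDepth := by
    apply List.map_congr_left; intro l _; rw [pvGLD_eq]
  rw [hmapc, hmapd]
  have hfunA : (fun (acc : List Char) (p : Int × List Char) =>
      if p.1 = ((lines.map pvContent).length : Int) - 1 then acc
      else if PySem.List.pyGetD (lines.map pvDepth) p.1 0 < PySem.List.pyGetD (lines.map pvDepth) (p.1 + 1) 0 then acc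
      else acc ++ p.2 ++ ['\n']) =
      (fun acc p => acc ++ (if p.1 = ((lines.map pvContent).length : Int) - 1 then []
      else if PySem.List.pyGetD (lines.map pvDepth) p.1 0 < PySem.List.pyGetD (lines.map pvDepth) (p.1 + 1) 0 then []
      else p.2 ++ ['\n'])) := by
    funext acc p; split_ifs <;> simp
  rw [hfunA, PySem.List.foldl_append_eq_flatMap, List.nil_append]
  have hA : ((PySem.List.enumerate (lines.map pvContent) (((0 : Nat)) : Int)).flatMap (fun p =>
      if p.1 = ((lines.map pvContent).length : Int) - 1 then []
      else if PySem.List.pyGetD (lines.map pvDepth) p.1 0 < PySem.List.pyGetD (lines.map pvDepth) (p.1 + 1) 0 then []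
      else p.2 ++ ['\n'])) = pvGo lines := by
    have hlen : (lines.map pvContent).length = lines.length := by simp
    rw [hlen]
    apply pvA_side lines 0 lines.length (lines.map pvDepth) (by simp)
    intro k hk
    have hc : ((0 : Nat) : Int) + (k : Int) = ((k : Nat) : Int) := by push_cast; ring
    rw [hc, PySem.List.pyGetD_natCast]
    rw [List.getD_eq_getElem _ _ (by simpa using hk), List.getElem_map]
    have hbang : lines[k]! = lines[k] := getElem!_pos lines k hk
    rw [hbang]
  simp only [Nat.cast_zero] at hA
  rw [hA]
  -- B side: reverse foldl → foldr, then the characterization pvB_side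
  rw [List.foldl_reverse, pvB_side]
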